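-- pv_equiv track=rewrite | github.com/Nerphist/treasure_hunt | main/functional_recursion_solution/main.py | search_for_treasure
-- ===== SOURCE A (Python) =====
-- def search_for_treasure(matrix, coordinate=11, runs=0, result='') -> str:
--     x, y = map(lambda a: int(a) - 1, str(coordinate))
--     cell_value = matrix[x][y]
--     result += f'{coordinate} '
--     runs += 1
--     return result[:-1] if cell_value == coordinate else search_for_treasure(matrix, cell_value, runs,
--                                                                             result) if runs < len(
--         matrix) ** 2 else 'The map has no solution'
-- ===== SOURCE B (Python) =====
-- def search_for_treasure(matrix, coordinate=11, runs=0, result='') -> str: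
--     path = []
--     for _ in range(max(len(matrix) ** 2 - runs, 1)):
--         x, y = divmod(coordinate, 10)
--         cell_value = matrix[x - 1][y - 1]
--         path.append(coordinate)
--         if cell_value == coordinate:
--             return result + ' '.join(str(c) for c in path)
--         coordinate = cell_value
--     return 'The map has no solution'
-- ===== Notes on version B (the rewrite author's own statement) =====
-- stated objective: alternative
-- what changed: Replaces A's recursion that parses str(coordinate) into digits and threads a growing trailing-space string trimmed by result[:-1], with a bounded for-range loop that splits the coordinate arithmetically via divmod(coordinate, 10) and collects the visited coordinates in a list joined once at the end.
import Mathlib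
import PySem

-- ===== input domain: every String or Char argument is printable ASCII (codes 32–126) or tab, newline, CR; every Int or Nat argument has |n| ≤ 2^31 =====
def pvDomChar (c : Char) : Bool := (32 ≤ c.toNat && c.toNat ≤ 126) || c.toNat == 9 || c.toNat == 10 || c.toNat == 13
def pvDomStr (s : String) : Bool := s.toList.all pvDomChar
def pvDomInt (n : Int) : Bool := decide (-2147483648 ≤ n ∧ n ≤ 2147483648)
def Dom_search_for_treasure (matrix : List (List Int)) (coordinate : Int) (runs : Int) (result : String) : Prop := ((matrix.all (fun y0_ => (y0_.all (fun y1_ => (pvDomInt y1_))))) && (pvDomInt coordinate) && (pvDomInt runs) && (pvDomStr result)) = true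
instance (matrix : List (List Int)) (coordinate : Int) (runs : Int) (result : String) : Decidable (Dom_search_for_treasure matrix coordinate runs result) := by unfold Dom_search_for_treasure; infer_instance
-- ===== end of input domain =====

-- B replaces A's nested-conditional recursion (str(coordinate) digit parsing, trailing-space string
-- trimmed by result[:-1]) with a bounded for-range loop that splits the coordinate arithmetically
-- via divmod(coordinate, 10) and joins a list of visited coordinates once; objective: alternative, same cost.


-- ===== PORT A =====
-- x, y = map(lambda a: int(a) - 1, str(coordinate)); none = ValueError / unpacking error
def pvParseXY (coordinate : Int) : Option (Int × Int) :=
  match (PySem.Int.toStr coordinate).toList with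
  | [a, b] =>
    match PySem.Int.ofStr? (String.ofList [a]), PySem.Int.ofStr? (String.ofList [b]) with
    | some xa, some yb => some (xa - 1, yb - 1)
    | _, _ => none
  | _ => none

-- matrix[x][y] with Python index semantics; none = IndexError
def pvCell (matrix : List (List Int)) (x y : Int) : Option Int :=
  match PySem.List.pyGet? matrix x with
  | some row => PySem.List.pyGet? row y
  | none => none

-- fuel: the recursion makes at most (len(matrix)**2 - runs) + 1 steps (runs grows by 1 each step)
def pvFuel (matrix : List (List Int)) (runs : Int) : Nat :=
  (((matrix.length : Int)) ^ 2 - runs).toNat + 1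

def pvGoA (matrix : List (List Int)) : Nat → Int → Int → String → String
  | 0, _, _, _ => "The map has no solution"   -- fuel guard, never reached
  | fuel + 1, coordinate, runs, result =>
    match pvParseXY coordinate with
    | none => ""                               -- Python raises here; excluded by Pre_
    | some (x, y) =>
      match pvCell matrix x y with
      | none => ""                             -- Python raises here; excluded by Pre_
      | some cell_value =>
        let result := result ++ PySem.Int.toStr coordinate ++ " "
        let runs := runs + 1
        if cell_value == coordinate then
          PySem.Str.slice result none (some (-1))       -- result[:-1]
        else if runs < ((matrix.length : Int)) ^ 2 then
          pvGoA matrix fuel cell_value runs result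
        else
          "The map has no solution"

def search_for_treasure (matrix : List (List Int)) (coordinate : Int) (runs : Int) (result : String) : String :=
  pvGoA matrix (pvFuel matrix runs) coordinate runs result

-- ===== PORT B =====
-- the for-loop body, recursing on the remaining iteration count of range(max(len(matrix)**2 - runs, 1))
def pvLoopB (matrix : List (List Int)) : Nat → Int → List Int → String → String
  | 0, _, _, _ => "The map has no solution"  -- loop exhausted
  | k + 1, coordinate, path, result =>
    let x := PySem.Int.floordiv coordinate 10   -- x, y = divmod(coordinate, 10)
    let y := PySem.Int.mod coordinate 10
    match PySem.List.pyGet? matrix (x - 1) with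
    | none => ""                                -- IndexError; excluded by Pre_
    | some row =>
      match PySem.List.pyGet? row (y - 1) with
      | none => ""                              -- IndexError; excluded by Pre_
      | some cell_value =>
        let path := path ++ [coordinate]
        if cell_value == coordinate then
          result ++ PySem.Str.join " " (path.map PySem.Int.toStr)
        else
          pvLoopB matrix k cell_value path result

def search_for_treasure_alt (matrix : List (List Int)) (coordinate : Int) (runs : Int) (result : String) : String :=
  pvLoopB matrix (max (((matrix.length : Int)) ^ 2 - runs) 1).toNat coordinate [] result

-- ===== PRECONDITION & SPEC =====
-- the chain of at most k pointer-chase steps starting at c never leaves the two-digit range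
-- 10..99 (elsewhere str(c) does not unpack into two ints) and never indexes outside the matrix
def pvChainOK (m : List (List Int)) (cap : Int) : Nat → Int → Int → Bool
  | 0, _, _ => true
  | k + 1, c, r =>
    (decide (10 ≤ c) && decide (c ≤ 99)) &&
      match pvCell m (PySem.Int.floordiv c 10 - 1) (PySem.Int.mod c 10 - 1) with
      | none => false
      | some v => v == c || decide (cap ≤ r + 1) || pvChainOK m cap k v (r + 1)

-- Pre_ = exactly the inputs on which the Python A returns: every coordinate the pointer chase
-- visits (start, then cell values, until a fixed point or the len(matrix)**2 cap) is a two-digit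
-- number 10..99 whose digit pair indexes into the matrix; anywhere else A raises
-- (ValueError / IndexError).
def Pre_search_for_treasure (matrix : List (List Int)) (coordinate : Int) (runs : Int) (result : String) : Prop :=
  pvChainOK matrix (((matrix.length : Int)) ^ 2) (pvFuel matrix runs) coordinate runs = true

instance (matrix : List (List Int)) (coordinate : Int) (runs : Int) (result : String) : Decidable (Pre_search_for_treasure matrix coordinate runs result) := by
  unfold Pre_search_for_treasure; infer_instance

def pvWitness_search_for_treasure : List (List Int) × Int × Int × String := ([[12, 21], [21, 21]], 11, 0, "")

def Spec_search_for_treasure (matrix : List (List Int)) (coordinate : Int) (runs : Int) (result : String) (out : String) : Prop := out = search_for_treasure_alt matrix coordinate runs result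
instance (matrix : List (List Int)) (coordinate : Int) (runs : Int) (result : String) (out : String) : Decidable (Spec_search_for_treasure matrix coordinate runs result out) := by unfold Spec_search_for_treasure; infer_instance

-- ===== CLAIM (what is proved, stated in full; the proofs are below) =====
def Claim_equal_search_for_treasure : Prop := ∀ (matrix : List (List Int)) (coordinate : Int) (runs : Int) (result : String), Dom_search_for_treasure matrix coordinate runs result → Pre_search_for_treasure matrix coordinate runs result → Spec_search_for_treasure matrix coordinate runs result (search_for_treasure matrix coordinate runs result)

-- ===== LEMMAS AND PROOFS =====

-- for a two-digit coordinate, A's string parse computes exactly B's divmod split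
lemma pv_parse_two_digit (c : Int) (h10 : 10 ≤ c) (h99 : c ≤ 99) :
    pvParseXY c = some (PySem.Int.floordiv c 10 - 1, PySem.Int.mod c 10 - 1) := by
  interval_cases c <;> decide

-- result[:-1] undoes the trailing space A appends
lemma pv_slice_drop_space (s : String) :
    PySem.Str.slice (s ++ " ") none (some (-1)) = s := by
  apply String.toList_inj.mp
  rw [PySem.Str.slice_to_neg_one]
  simp

lemma pv_chars_join (path : List (List Char)) (t : List Char) :
    PySem.Chars.join [' '] (path ++ [t]) =
      path.flatMap (fun s => s ++ [' ']) ++ t := by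
  induction path with
  | nil => simp [PySem.Chars.join_singleton]
  | cons p ps ih =>
    rcases hps : ps ++ [t] with _ | ⟨q, rest⟩
    · exact absurd hps (by simp)
    · rw [List.cons_append, hps, PySem.Chars.join_cons_cons, ← hps, ih]
      simp

lemma pv_foldl_toList (path : List Int) (res : String) :
    (path.foldl (fun acc d => acc ++ PySem.Int.toStr d ++ " ") res).toList =
      res.toList ++ (path.map (fun d => (PySem.Int.toStr d).toList)).flatMap (fun s => s ++ [' ']) := by
  induction path generalizing res with
  | nil => simp
  | cons p ps ih => simp [List.foldl_cons, ih]

-- res ++ ' '.join over (path++[c]) equals A's fold-with-trailing-space followed by str(c)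
lemma pv_join_eq_fold (path : List Int) (res : String) (c : Int) :
    res ++ PySem.Str.join " " ((path ++ [c]).map PySem.Int.toStr) =
      path.foldl (fun acc d => acc ++ PySem.Int.toStr d ++ " ") res ++ PySem.Int.toStr c := by
  apply String.toList_inj.mp
  simp [PySem.Str.toList_join, pv_foldl_toList]
  have := pv_chars_join (path.map (fun d => (PySem.Int.toStr d).toList)) (PySem.Int.toStr c).toList
  simpa [List.map_map, Function.comp_def] using this

lemma pv_loopB_eq_goA (matrix : List (List Int)) :
    ∀ (n : Nat) (c r : Int) (res : String) (path : List Int),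
      (((matrix.length : Int)) ^ 2 - r).toNat = n →
      pvChainOK matrix (((matrix.length : Int)) ^ 2) (n + 1) c r = true →
      pvLoopB matrix (max (((matrix.length : Int)) ^ 2 - r) 1).toNat c path res =
        pvGoA matrix (n + 1) c r (path.foldl (fun acc d => acc ++ PySem.Int.toStr d ++ " ") res) := by
  intro n
  induction n with
  | zero =>
    intro c r res path hn hok
    rw [pvChainOK] at hok
    simp only [Bool.and_eq_true, decide_eq_true_eq] at hok
    obtain ⟨⟨h10, h99⟩, hok⟩ := hok
    have hcap : ((matrix.length : Int)) ^ 2 - r ≤ 0 := by omega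
    have hmax : (max (((matrix.length : Int)) ^ 2 - r) 1).toNat = 1 := by omega
    rw [hmax, pvLoopB, pvGoA, pv_parse_two_digit c h10 h99]
    cases hcell : pvCell matrix (PySem.Int.floordiv c 10 - 1) (PySem.Int.mod c 10 - 1) with
    | none => rw [hcell] at hok; simp at hok
    | some v =>
      rw [hcell] at hok
      have hrow : ∃ row, PySem.List.pyGet? matrix (PySem.Int.floordiv c 10 - 1) = some row ∧
          PySem.List.pyGet? row (PySem.Int.mod c 10 - 1) = some v := by
        unfold pvCell at hcell
        split at hcell
        · exact ⟨_, by assumption, hcell⟩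
        · exact absurd hcell (by simp)
      obtain ⟨row, hr1, hr2⟩ := hrow
      simp only [hr1, hr2, hcell]
      by_cases hv : v == c
      · simp only [hv, if_pos]
        rw [pv_join_eq_fold, pv_slice_drop_space]
      · simp only [hv, Bool.false_eq_true, if_neg, not_false_iff]
        rw [if_neg (by omega), pvLoopB]
  | succ m ih =>
    intro c r res path hn hok
    rw [pvChainOK] at hok
    simp only [Bool.and_eq_true, decide_eq_true_eq] at hok
    obtain ⟨⟨h10, h99⟩, hok⟩ := hok
    have hpos : ((matrix.length : Int)) ^ 2 - r = (m : Int) + 1 := by omega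
    have hmax : (max (((matrix.length : Int)) ^ 2 - r) 1).toNat = m + 1 := by omega
    rw [hmax, pvLoopB, pvGoA, pv_parse_two_digit c h10 h99]
    cases hcell : pvCell matrix (PySem.Int.floordiv c 10 - 1) (PySem.Int.mod c 10 - 1) with
    | none => rw [hcell] at hok; simp at hok
    | some v =>
      rw [hcell] at hok
      have hrow : ∃ row, PySem.List.pyGet? matrix (PySem.Int.floordiv c 10 - 1) = some row ∧
          PySem.List.pyGet? row (PySem.Int.mod c 10 - 1) = some v := by
        unfold pvCell at hcell
        split at hcell
        · exact ⟨_, by assumption, hcell⟩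
        · exact absurd hcell (by simp)
      obtain ⟨row, hr1, hr2⟩ := hrow
      simp only [hr1, hr2, hcell]
      by_cases hv : v == c
      · simp only [hv, if_pos]
        rw [pv_join_eq_fold, pv_slice_drop_space]
      · simp only [hv, Bool.false_eq_true, if_neg, not_false_iff]
        by_cases h2 : r + 1 < ((matrix.length : Int)) ^ 2
        · rw [if_pos h2]
          have hok' : pvChainOK matrix (((matrix.length : Int)) ^ 2) (m + 1) v (r + 1) = true := by
            simp only [Bool.or_eq_true, decide_eq_true_eq] at hok
            rcases hok with (h | h) | h
            · exact absurd h hv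
            · exact absurd h (by omega)
            · exact h
          have := ih v (r + 1) res (path ++ [c]) (by omega) hok'
          have hm : (max (((matrix.length : Int)) ^ 2 - (r + 1)) 1).toNat = m := by omega
          rw [hm] at this
          rw [this, List.foldl_append]
          rfl
        · rw [if_neg h2]
          have : m = 0 := by omega
          subst this
          rw [pvLoopB]

-- ===== VERDICT (by name: the statement is the Claim_ definition above) =====
theorem search_for_treasure_spec : Claim_equal_search_for_treasure := by
  intro matrix coordinate runs result _ hpre
  unfold Spec_search_for_treasure search_for_treasure search_for_treasure_alt
  rw [pv_loopB_eq_goA matrix ((((matrix.length : Int)) ^ 2 - runs).toNat) coordinate runs result []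
    rfl (by exact hpre)]
  rfl
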